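-- pv_equiv track=rewrite | github.com/GLY99/python_code | leetcode/one_daily_question/202303/find_subarrays.py | findSubarrays
-- ===== SOURCE A (Python) =====
-- from typing import List
--
-- def findSubarrays(nums: List[int]) -> bool:
--     """
--     find sub arrays
--     """
--     sum_count = set()
--     length = len(nums)
--     for i in range(0, length - 1):
--         sum = nums[i] + nums[i + 1]
--         if sum in sum_count:
--             return True
--         sum_count.add(sum)
--     return False
-- ===== SOURCE B (Python) =====
-- def findSubarrays(nums):
--     sums = sorted(a + b for a, b in zip(nums, nums[1:]))
--     return any(x == y for x, y in zip(sums, sums[1:]))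
-- ===== Notes on version B (the rewrite author's own statement) =====
-- stated objective: alternative
-- what changed: Replaces the hash-set duplicate detection with a sort-then-scan: build all adjacent-pair sums, sort them, and report whether any two consecutive sorted entries are equal.
import Mathlib
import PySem

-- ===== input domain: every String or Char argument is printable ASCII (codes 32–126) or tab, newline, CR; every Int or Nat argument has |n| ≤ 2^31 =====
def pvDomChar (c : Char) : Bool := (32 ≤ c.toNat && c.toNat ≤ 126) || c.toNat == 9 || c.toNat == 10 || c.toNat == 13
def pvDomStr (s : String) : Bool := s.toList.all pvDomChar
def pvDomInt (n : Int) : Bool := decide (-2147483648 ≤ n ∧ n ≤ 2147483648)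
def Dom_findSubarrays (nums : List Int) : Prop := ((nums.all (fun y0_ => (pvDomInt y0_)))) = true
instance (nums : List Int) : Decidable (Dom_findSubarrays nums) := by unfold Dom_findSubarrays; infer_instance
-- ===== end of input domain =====

-- B replaces A's incremental hash-set duplicate detection with sort-then-scan: build all
-- adjacent-pair sums, sort them, and report whether any two consecutive sorted entries are equal.

-- ===== PORT A =====
def findSubarrays (nums : List Int) : Bool :=
  -- sum_count = set(); length = len(nums); for i in range(0, length-1): sum = nums[i]+nums[i+1]
  -- (sum inlined at both of its uses); 'return True' becomes a sticky flag in the fold state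
  (((PySem.List.pyRange 0 (PySem.List.len nums - 1) 1).foldl
    (fun (st : PySem.Set Int × Bool) i =>
      if st.2 then st
      else
        if PySem.Set.contains st.1 (PySem.List.pyGetD nums i 0 + PySem.List.pyGetD nums (i + 1) 0)
        then (st.1, true)
        else (PySem.Set.add st.1 (PySem.List.pyGetD nums i 0 + PySem.List.pyGetD nums (i + 1) 0), st.2))
    (PySem.Set.empty, false)).2)

-- ===== PORT B =====
def findSubarrays_alt (nums : List Int) : Bool :=
  -- sums = sorted(a + b for a, b in zip(nums, nums[1:]))
  let sums := PySem.List.sorted (List.zipWith (fun a b => a + b) nums (nums.drop 1)) (fun x => x) false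
  -- any(x == y for x, y in zip(sums, sums[1:]))
  (List.zipWith (fun x y => x == y) sums (sums.drop 1)).any id

-- ===== PRECONDITION & SPEC =====
def Spec_findSubarrays (nums : List Int) (out : Bool) : Prop := out = findSubarrays_alt nums
instance (nums : List Int) (out : Bool) : Decidable (Spec_findSubarrays nums out) := by unfold Spec_findSubarrays; infer_instance

-- ===== CLAIM (what is proved, stated in full; the proofs are below) =====
def Claim_equal_findSubarrays : Prop := ∀ (nums : List Int), Dom_findSubarrays nums → Spec_findSubarrays nums (findSubarrays nums)

-- ===== LEMMAS AND PROOFS =====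

-- A's loop without the early-exit flag, as structural recursion over the list of pair sums
def goDup : List Int → PySem.Set Int → Bool
  | [], _ => false
  | x :: xs, s => if PySem.Set.contains s x then true else goDup xs (PySem.Set.add s x)

lemma foldl_flag_true (l : List Int) (s : PySem.Set Int) :
    (l.foldl
      (fun (st : PySem.Set Int × Bool) v =>
        if st.2 then st
        else if PySem.Set.contains st.1 v then (st.1, true) else (PySem.Set.add st.1 v, st.2))
      (s, true)) = (s, true) := by
  induction l with
  | nil => rfl
  | cons x xs ih => simpa using ih

lemma foldl_eq_goDup (l : List Int) (s : PySem.Set Int) :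
    ((l.foldl
      (fun (st : PySem.Set Int × Bool) v =>
        if st.2 then st
        else if PySem.Set.contains st.1 v then (st.1, true) else (PySem.Set.add st.1 v, st.2))
      (s, false)).2) = goDup l s := by
  induction l generalizing s with
  | nil => rfl
  | cons x xs ih =>
      rw [List.foldl_cons]
      show (List.foldl
          (fun (st : PySem.Set Int × Bool) v =>
            if st.2 then st
            else if PySem.Set.contains st.1 v then (st.1, true) else (PySem.Set.add st.1 v, st.2))
          (if PySem.Set.contains s x then (s, true) else (PySem.Set.add s x, false)) xs).2
        = (if PySem.Set.contains s x then true else goDup xs (PySem.Set.add s x))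
      by_cases hc : PySem.Set.contains s x = true
      · rw [if_pos hc, if_pos hc, foldl_flag_true]
      · rw [if_neg hc, if_neg hc]
        exact ih _

-- goDup is the global duplicate test: true iff l has a repeat or meets the seen-set s
lemma goDup_eq_nodup_test (l : List Int) (s : PySem.Set Int) :
    goDup l s = !decide (l.Nodup ∧ ∀ x ∈ l, x ∉ s) := by
  induction l generalizing s with
  | nil => simp [goDup]
  | cons x xs ih =>
      simp only [goDup]
      by_cases hc : PySem.Set.contains s x = true
      · have hx : x ∈ s := (PySem.Set.contains_iff _ _).mp hc
        rw [if_pos hc]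
        simp [hx]
      · have hx : x ∉ s := fun h => hc ((PySem.Set.contains_iff _ _).mpr h)
        rw [if_neg hc, ih]
        congr 1
        rw [decide_eq_decide]
        constructor
        · rintro ⟨hnd, hmem⟩
          refine ⟨List.nodup_cons.mpr ⟨?_, hnd⟩, ?_⟩
          · intro hxm
            exact (hmem x hxm) ((PySem.Set.mem_add _ _ _).mpr (Or.inr rfl))
          · intro y hy
            rcases hy with _ | hy
            · exact hx
            · intro hs
              exact (hmem y (by assumption)) ((PySem.Set.mem_add _ _ _).mpr (Or.inl hs))
        · rintro ⟨hnd, hmem⟩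
          rcases List.nodup_cons.mp hnd with ⟨hxn, hnd'⟩
          refine ⟨hnd', ?_⟩
          intro y hy hys
          rcases (PySem.Set.mem_add _ _ _).mp hys with h | h
          · exact (hmem y (List.mem_cons_of_mem _ hy)) h
          · exact hxn (h ▸ hy)

lemma sums_eq' (nums : List Int) :
    (List.range (nums.length - 1)).map
        (fun (k : Nat) => PySem.List.pyGetD nums (0 + (k : Int)) 0
                  + PySem.List.pyGetD nums (0 + (k : Int) + 1) 0)
      = List.zipWith (fun a b => a + b) nums (nums.drop 1) := by
  have base : (List.range (nums.length - 1)).map (fun k => nums.getD k 0 + nums.getD (k + 1) 0)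
      = List.zipWith (fun a b => a + b) nums (nums.drop 1) := by
    induction nums with
    | nil => rfl
    | cons x xs ih =>
        cases xs with
        | nil => rfl
        | cons y ys =>
            simp only [List.length_cons, Nat.add_sub_cancel, List.range_succ_eq_map,
              List.map_cons, List.map_map, List.drop_one, List.tail_cons,
              List.zipWith_cons_cons]
            congr 1
  rw [← base]
  apply List.map_congr_left
  intro k _
  have h1 : PySem.List.pyGetD nums (0 + (k : Int)) 0 = nums.getD k 0 := by
    rw [Int.zero_add]; exact PySem.List.pyGetD_natCast nums k 0
  have h2 : PySem.List.pyGetD nums (0 + (k : Int) + 1) 0 = nums.getD (k + 1) 0 := by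
    have he : (0 : Int) + (k : Int) + 1 = ((k + 1 : Nat) : Int) := by push_cast; ring
    rw [he]; exact PySem.List.pyGetD_natCast nums (k + 1) 0
  rw [h1, h2]

lemma A_eq_goDup (nums : List Int) :
    findSubarrays nums
      = goDup (List.zipWith (fun a b => a + b) nums (nums.drop 1)) PySem.Set.empty := by
  unfold findSubarrays
  rw [PySem.List.pyRange_one]
  have hlen : ((PySem.List.len nums - 1 - 0).toNat) = nums.length - 1 := by
    simp only [PySem.List.len_eq]; omega
  rw [hlen, ← foldl_eq_goDup, ← sums_eq' nums]
  simp only [List.foldl_map]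

-- on a ≤-sorted list, the adjacent-equality scan is the global duplicate test
lemma adj_scan_of_pairwise (l : List Int) (hp : l.Pairwise (· ≤ ·)) :
    (List.zipWith (fun x y => x == y) l (l.drop 1)).any id = !decide l.Nodup := by
  induction l with
  | nil => simp
  | cons x xs ih =>
      cases xs with
      | nil => simp
      | cons y ys =>
          rcases List.pairwise_cons.mp hp with ⟨hxall, hp'⟩
          simp only [List.drop_one, List.tail_cons, List.zipWith_cons_cons, List.any_cons, id]
          by_cases hxy : x = y
          · have : x ∈ y :: ys := by simp [hxy]
            simp [hxy, List.nodup_cons]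
          · have hx_notin : x ∉ y :: ys := by
              intro hm
              rcases List.mem_cons.mp hm with h | h
              · exact hxy h
              · rcases List.pairwise_cons.mp hp' with ⟨hyall, _⟩
                exact hxy (le_antisymm (hxall y (List.mem_cons_self)) (hyall x h))
            have hrec := ih hp'
            simp only [List.drop_one, List.tail_cons] at hrec
            rw [beq_eq_false_iff_ne.mpr hxy, Bool.false_or, hrec]
            congr 1
            rw [decide_eq_decide]
            simp [List.nodup_cons, hx_notin]

-- ===== VERDICT (by name: the statement is the Claim_ definition above) =====
theorem findSubarrays_spec : Claim_equal_findSubarrays := by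
  intro nums _
  unfold Spec_findSubarrays findSubarrays_alt
  rw [A_eq_goDup, goDup_eq_nodup_test]
  have hperm := PySem.List.sorted_perm
    (xs := List.zipWith (fun a b => a + b) nums (nums.drop 1)) (key := fun x => x) (rev := false)
  rw [adj_scan_of_pairwise _ (PySem.List.sorted_pairwise _ _)]
  congr 1
  rw [decide_eq_decide, hperm.nodup_iff]
  simp [PySem.Set.empty]
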